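-- pv_equiv track=rewrite | github.com/vanessa108/advent_of_code | 2021/6.py | update_fish
-- ===== SOURCE A (Python) =====
-- def update_fish(fish_list):
--     for i in range(len(fish_list)):
--         if fish_list[i] == 0:
--             fish_list[i] = 6
--             fish_list.append(8)
--         else:
--             fish_list[i] -= 1
--     return fish_list
-- ===== SOURCE B (Python) =====
-- def update_fish(fish_list):
--     # Phase 1: every fish ages by one day, unconditionally.
--     for i in range(len(fish_list)):
--         fish_list[i] -= 1
--     # Phase 2: expired fish (now at -1) reset their timer and each spawns one newborn.
--     births = 0
--     for i in range(len(fish_list)):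
--         if fish_list[i] == -1:
--             fish_list[i] = 6
--             births += 1
--     fish_list.extend([8] * births)
--     return fish_list
-- ===== Notes on version B (the rewrite author's own statement) =====
-- stated objective: alternative
-- what changed: B replaces A's single conditional pass (branch on 0, append an 8 inside the loop while the list grows) with two staged in-place passes: an unconditional decrement of every timer, then a repair pass that detects expired fish by the -1 sentinel, resets them to 6 and counts births, extending with all 8s at the end.
import Mathlib
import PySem

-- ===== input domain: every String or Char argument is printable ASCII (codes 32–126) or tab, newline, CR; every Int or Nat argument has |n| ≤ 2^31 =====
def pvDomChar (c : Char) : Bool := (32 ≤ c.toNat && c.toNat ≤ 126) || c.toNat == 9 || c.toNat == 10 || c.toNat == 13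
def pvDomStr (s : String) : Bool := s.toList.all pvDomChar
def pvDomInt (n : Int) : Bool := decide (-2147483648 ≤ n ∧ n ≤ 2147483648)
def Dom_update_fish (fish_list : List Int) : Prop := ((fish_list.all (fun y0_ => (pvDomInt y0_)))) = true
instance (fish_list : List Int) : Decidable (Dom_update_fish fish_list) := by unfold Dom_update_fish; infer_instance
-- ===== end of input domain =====

-- B ages every fish unconditionally, then a repair pass resets -1 sentinels to 6 and counts
-- births, extending with the 8s once; A branches per element and appends inside the loop.
-- Both Pythons mutate the argument list in place to the same final contents; the equivalence
-- proved here is about the return value.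

-- ===== PORT A =====
-- A iterates i over range(len(fish_list)) fixed at entry; every index is in range (the list
-- only grows), so getD/set with default 0 is exact here.
def update_fish (fish_list : List Int) : List Int :=
  (List.range fish_list.length).foldl
    (fun acc i =>
      if acc.getD i 0 == 0 then (acc.set i 6) ++ [8]
      else acc.set i (acc.getD i 0 - 1))
    fish_list

-- ===== PORT B =====
def update_fish_alt (fish_list : List Int) : List Int :=
  let aged := (List.range fish_list.length).foldl
    (fun acc i => acc.set i (acc.getD i 0 - 1)) fish_list
  let st := (List.range aged.length).foldl
    (fun (p : List Int × Nat) i =>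
      if p.1.getD i 0 == -1 then (p.1.set i 6, p.2 + 1) else p)
    (aged, 0)
  st.1 ++ List.replicate st.2 8

-- ===== PRECONDITION & SPEC =====
def Spec_update_fish (fish_list : List Int) (out : List Int) : Prop := out = update_fish_alt fish_list
instance (fish_list : List Int) (out : List Int) : Decidable (Spec_update_fish fish_list out) := by unfold Spec_update_fish; infer_instance

-- ===== CLAIM (what is proved, stated in full; the proofs are below) =====
def Claim_equal_update_fish : Prop := ∀ (fish_list : List Int), Dom_update_fish fish_list → Spec_update_fish fish_list (update_fish fish_list)

-- ===== LEMMAS AND PROOFS =====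

-- Loop invariant for A's fold: processing indices [pre.length, pre.length + l.length) on a state
-- pre ++ l ++ eights maps l in place and moves one 8 to the tail for each zero of l.
theorem update_fish_loopA (l : List Int) : ∀ (pre eights : List Int),
    (List.range' pre.length l.length).foldl
      (fun acc i =>
        if acc.getD i 0 == 0 then (acc.set i 6) ++ [8]
        else acc.set i (acc.getD i 0 - 1))
      (pre ++ l ++ eights)
    = pre ++ l.map (fun x => if x == 0 then 6 else x - 1) ++ eights ++ List.replicate (l.count 0) 8 := by
  induction l with
  | nil => intro pre eights; simp
  | cons a t ih =>
    intro pre eights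
    have hget : ((pre ++ a :: t ++ eights).getD pre.length 0) = a := by simp
    have hset : ∀ v : Int, (pre ++ a :: t ++ eights).set pre.length v = pre ++ v :: t ++ eights := by
      intro v; simp
    rw [List.length_cons, List.range'_succ, List.foldl_cons]
    by_cases ha : a = 0
    · subst ha
      simp only [hget, hset, beq_self_eq_true, if_true]
      have h1 : ((pre ++ (6:Int) :: t ++ eights) ++ [8]) = (pre ++ [6]) ++ t ++ (eights ++ [8]) := by
        simp
      have h2 : pre.length + 1 = (pre ++ [(6:Int)]).length := by simp
      rw [h1, h2, ih]
      simp [List.replicate_succ]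
    · have hne : (a == 0) = false := by simp [ha]
      simp only [hget, hset, hne, Bool.false_eq_true, if_false]
      have h1 : (pre ++ (a-1) :: t ++ eights) = (pre ++ [a-1]) ++ t ++ eights := by simp
      have h2 : pre.length + 1 = (pre ++ [a - 1]).length := by simp
      rw [h1, h2, ih]
      simp [ha]

-- Invariant for B's aging pass: decrement each position of l in place.
theorem update_fish_loopB1 (l : List Int) : ∀ (pre : List Int),
    (List.range' pre.length l.length).foldl
      (fun acc i => acc.set i (acc.getD i 0 - 1)) (pre ++ l)
    = pre ++ l.map (fun x => x - 1) := by
  induction l with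
  | nil => intro pre; simp
  | cons a t ih =>
    intro pre
    have hget : ((pre ++ a :: t).getD pre.length 0) = a := by simp
    have hset : (pre ++ a :: t).set pre.length (a - 1) = pre ++ (a - 1) :: t := by simp
    rw [List.length_cons, List.range'_succ, List.foldl_cons, hget, hset]
    have h1 : (pre ++ (a-1) :: t) = (pre ++ [a-1]) ++ t := by simp
    have h2 : pre.length + 1 = (pre ++ [a - 1]).length := by simp
    rw [h1, h2, ih]
    simp

-- Invariant for B's repair pass: reset each -1 of l to 6 and add one birth per -1.
theorem update_fish_loopB2 (l : List Int) : ∀ (pre : List Int) (c : Nat),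
    (List.range' pre.length l.length).foldl
      (fun (p : List Int × Nat) i =>
        if p.1.getD i 0 == -1 then (p.1.set i 6, p.2 + 1) else p)
      (pre ++ l, c)
    = (pre ++ l.map (fun y => if y == -1 then 6 else y), c + l.count (-1)) := by
  induction l with
  | nil => intro pre c; simp
  | cons a t ih =>
    intro pre c
    have hget : ((pre ++ a :: t).getD pre.length 0) = a := by simp
    rw [List.length_cons, List.range'_succ, List.foldl_cons]
    by_cases ha : a = -1
    · subst ha
      have hset : (pre ++ (-1:Int) :: t).set pre.length 6 = pre ++ (6:Int) :: t := by simp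
      simp only [hget, beq_self_eq_true, if_true, hset]
      have h1 : (pre ++ (6:Int) :: t) = (pre ++ [(6:Int)]) ++ t := by simp
      have h2 : pre.length + 1 = (pre ++ [(6:Int)]).length := by simp
      rw [h1, h2, ih]
      simp
      omega
    · have hne : (a == -1) = false := by simp [ha]
      simp only [hget, hne, Bool.false_eq_true, if_false]
      have h1 : (pre ++ a :: t) = (pre ++ [a]) ++ t := by simp
      have h2 : pre.length + 1 = (pre ++ [a]).length := by simp
      rw [h1, h2, ih]
      simp [ha]

-- ===== VERDICT (by name: the statement is the Claim_ definition above) =====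
theorem update_fish_spec : Claim_equal_update_fish := by
  intro l _
  show update_fish l = update_fish_alt l
  have hA := update_fish_loopA l [] []
  have hB1 := update_fish_loopB1 l []
  simp only [List.nil_append, List.append_nil, List.length_nil] at hA hB1
  have hB2 := update_fish_loopB2 (l.map (fun x => x - 1)) [] 0
  simp only [List.nil_append, List.length_nil, Nat.zero_add, List.length_map] at hB2
  rw [update_fish, update_fish_alt, List.range_eq_range', hA]
  simp only [List.range_eq_range', hB1, List.length_map, hB2]
  congr 1
  · rw [List.map_map]
    apply List.map_congr_left
    intro x _
    by_cases hx : x = 0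
    · simp [hx]
    · have h1 : (x == 0) = false := by simp [hx]
      have h2 : (x - 1 == -1) = false := by simp; omega
      simp [h1, h2, Function.comp]
  · congr 1
    rw [List.count_eq_countP, List.count_eq_countP, List.countP_map]
    apply List.countP_congr
    intro x _
    simp [Function.comp]
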